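-- pv_equiv track=rewrite | github.com/Michal-D4/filemon | prj_info/method_link.py | pre_report
-- ===== SOURCE A (Python) =====
-- def pre_report(list_of_dicts):
--     if not list_of_dicts:
--         return (), (), {}
--     rd = list_of_dicts[0]
--     all_ = set(rd.keys())
--     any_ = set(rd.keys())
--     for tpl in list_of_dicts[1:]:
--         rd.update(tpl)
--         tt = set(tpl.keys())
--         all_ = all_ & tt
--         any_ = any_ | tt
--
--     return all_, any_, rd
-- ===== SOURCE B (Python) =====
-- def pre_report(list_of_dicts):
--     if not list_of_dicts:
--         return (), (), {}
--     head_keys = list(list_of_dicts[0])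
--     rest_key_sets = [set(d) for d in list_of_dicts[1:]]
--     all_ = {k for k in head_keys if all(k in s for s in rest_key_sets)}
--     any_ = {k for d in list_of_dicts for k in d}
--     rd = {k: v for d in list_of_dicts for k, v in d.items()}
--     return all_, any_, rd
-- ===== Notes on version B (the rewrite author's own statement) =====
-- stated objective: idiomatic
-- what changed: A interleaves merge, intersection and union in one mutating loop over the dicts; B computes each result independently with one-shot comprehensions: the intersection as a filter of the first dict's keys against snapshot key sets, the union as a flat set comprehension over all dicts, and the merged dict as a single flat dict comprehension (B does not mutate list_of_dicts[0]).
import Mathlib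
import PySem

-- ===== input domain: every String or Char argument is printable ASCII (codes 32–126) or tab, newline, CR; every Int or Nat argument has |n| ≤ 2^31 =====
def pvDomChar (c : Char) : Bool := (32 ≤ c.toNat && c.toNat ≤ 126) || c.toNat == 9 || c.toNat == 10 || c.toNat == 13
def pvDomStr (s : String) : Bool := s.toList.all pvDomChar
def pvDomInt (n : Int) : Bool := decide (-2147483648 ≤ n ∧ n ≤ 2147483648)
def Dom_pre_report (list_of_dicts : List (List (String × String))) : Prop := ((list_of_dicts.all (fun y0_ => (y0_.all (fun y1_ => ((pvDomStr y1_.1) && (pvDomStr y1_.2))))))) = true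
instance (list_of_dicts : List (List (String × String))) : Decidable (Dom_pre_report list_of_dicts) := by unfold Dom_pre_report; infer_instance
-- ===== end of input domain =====

-- B replaces A's single merge-and-intersect loop by comprehension-style one-shot formulas
-- (filter for the intersection, flatten+dedup for the union, one flat dict build for the merge);
-- equivalence is about the RETURN value only: Python A mutates list_of_dicts[0] in place, B does not.

-- ===== PORT A =====
def pre_report (list_of_dicts : List (List (String × String))) : List String × List String × (List (String × String)) :=
  match list_of_dicts with
  | [] => ([], [], [])
  | first :: rest =>
    let rd0 : PySem.Dict String String := PySem.Dict.ofList first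
    let all0 : PySem.Set String := PySem.Set.ofList rd0.keys
    let any0 : PySem.Set String := PySem.Set.ofList rd0.keys
    let res := rest.foldl (fun st tpl =>
        let rdt : PySem.Dict String String := PySem.Dict.ofList tpl
        let rd' := st.1.update rdt.items
        let tt : PySem.Set String := PySem.Set.ofList rdt.keys
        (rd', PySem.Set.inter st.2.1 tt, PySem.Set.union st.2.2 tt))
      (rd0, all0, any0)
    (res.2.1, res.2.2, res.1.items)

-- ===== PORT B =====
def pre_report_alt (list_of_dicts : List (List (String × String))) : List String × List String × (List (String × String)) :=
  match list_of_dicts with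
  | [] => ([], [], [])
  | first :: rest =>
    let headKeys : List String := (PySem.Dict.ofList first).keys
    let restKeySets : List (PySem.Set String) :=
      rest.map (fun d => PySem.Set.ofList (PySem.Dict.ofList (κ := String) (ν := String) d).keys)
    let all_ : PySem.Set String :=
      PySem.Set.ofList (headKeys.filter (fun k => restKeySets.all (fun s => s.contains k)))
    let any_ : PySem.Set String :=
      PySem.Set.ofList ((list_of_dicts.map (fun d => (PySem.Dict.ofList (κ := String) (ν := String) d).keys)).flatten)
    let rd : PySem.Dict String String :=
      PySem.Dict.ofList ((list_of_dicts.map (fun d => (PySem.Dict.ofList (κ := String) (ν := String) d).items)).flatten)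
    (all_, any_, rd.items)

-- ===== PRECONDITION & SPEC =====
def Spec_pre_report (list_of_dicts : List (List (String × String))) (out : List String × List String × (List (String × String))) : Prop := out = pre_report_alt list_of_dicts
instance (list_of_dicts : List (List (String × String))) (out : List String × List String × (List (String × String))) : Decidable (Spec_pre_report list_of_dicts out) := by unfold Spec_pre_report; infer_instance

-- ===== CLAIM (what is proved, stated in full; the proofs are below) =====
def Claim_equal_pre_report : Prop := ∀ (list_of_dicts : List (List (String × String))), Dom_pre_report list_of_dicts → Spec_pre_report list_of_dicts (pre_report list_of_dicts)

-- ===== LEMMAS AND PROOFS =====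

theorem pv_foldl_split (rest : List (List (String × String))) (d : PySem.Dict String String)
    (a u : PySem.Set String) :
    rest.foldl (fun st tpl =>
        (st.1.update (PySem.Dict.ofList tpl).items,
         PySem.Set.inter st.2.1 (PySem.Set.ofList (PySem.Dict.ofList (κ := String) (ν := String) tpl).keys),
         PySem.Set.union st.2.2 (PySem.Set.ofList (PySem.Dict.ofList (κ := String) (ν := String) tpl).keys))) (d, a, u)
    = (rest.foldl (fun d tpl => d.update (PySem.Dict.ofList tpl).items) d,
       rest.foldl (fun a tpl => PySem.Set.inter a (PySem.Set.ofList (PySem.Dict.ofList (κ := String) (ν := String) tpl).keys)) a,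
       rest.foldl (fun u tpl => PySem.Set.union u (PySem.Set.ofList (PySem.Dict.ofList (κ := String) (ν := String) tpl).keys)) u) := by
  induction rest generalizing d a u with
  | nil => rfl
  | cons t ts ih => simp only [List.foldl_cons, ih]

theorem pv_inter_fold (sets : List (PySem.Set String)) (s : List String) :
    sets.foldl PySem.Set.inter s = s.filter (fun k => sets.all (fun t => t.contains k)) := by
  induction sets generalizing s with
  | nil => simp
  | cons t ts ih =>
    simp only [List.foldl_cons, ih, PySem.Set.inter, List.filter_filter, List.all_cons]
    exact List.filter_congr (fun k _ => by rw [Bool.and_comm])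

theorem pv_update_ofList (s : PySem.Set String) (ks : List String) :
    PySem.Set.update s (PySem.Set.ofList ks) = PySem.Set.update s ks := by
  rw [PySem.Set.update_eq_append_filter, PySem.Set.update_eq_append_filter, PySem.Set.ofList_ofList]

theorem pv_union_fold (kss : List (List String)) (acc : List String) :
    (kss.map PySem.Set.ofList).foldl PySem.Set.union (PySem.Set.ofList acc)
    = PySem.Set.ofList (acc ++ kss.flatten) := by
  induction kss generalizing acc with
  | nil => simp
  | cons ks kss ih =>
    have h : PySem.Set.union (PySem.Set.ofList acc) (PySem.Set.ofList ks)
        = PySem.Set.ofList (acc ++ ks) := by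
      rw [PySem.Set.ofList_append, PySem.Set.union, pv_update_ofList]
    simp only [List.map_cons, List.foldl_cons, h, ih, List.flatten_cons, List.append_assoc]

theorem pv_update_append (d : PySem.Dict String String) (xs ys : List (String × String)) :
    d.update (xs ++ ys) = (d.update xs).update ys := by
  simp [PySem.Dict.update, List.foldl_append]

theorem pv_merge_fold (rest : List (List (String × String))) (d : PySem.Dict String String) :
    rest.foldl (fun d tpl => PySem.Dict.update d (PySem.Dict.ofList tpl).items) d
    = d.update ((rest.map (fun t => (PySem.Dict.ofList (κ := String) (ν := String) t).items)).flatten) := by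
  induction rest generalizing d with
  | nil => simp [PySem.Dict.update]
  | cons t ts ih =>
    simp only [List.foldl_cons, ih, List.map_cons, List.flatten_cons, pv_update_append]

theorem pv_ofList_append (xs ys : List (String × String)) :
    PySem.Dict.ofList (xs ++ ys) = (PySem.Dict.ofList (κ := String) (ν := String) xs).update ys := by
  simp [PySem.Dict.ofList, pv_update_append]

theorem pv_ofList_items (d0 : List (String × String)) :
    PySem.Dict.ofList ((PySem.Dict.ofList (κ := String) (ν := String) d0).items)
    = PySem.Dict.ofList d0 := by
  apply PySem.Dict.ext
  have h := PySem.Dict.items_foldl_insert_fresh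
    (l := (PySem.Dict.ofList (κ := String) (ν := String) d0).items)
    (k := Prod.fst) (v := Prod.snd) (d := PySem.Dict.empty)
    (by intro a _; simp [PySem.Dict.contains_empty])
    (by simpa [PySem.Dict.keys] using PySem.Dict.nodup_keys_ofList (ps := d0))
  simpa [PySem.Dict.ofList, PySem.Dict.update] using h

-- ===== VERDICT (by name: the statement is the Claim_ definition above) =====
theorem pre_report_spec : Claim_equal_pre_report := by
  intro l _
  unfold Spec_pre_report
  cases l with
  | nil => rfl
  | cons first rest =>
    simp only [pre_report, pre_report_alt]
    rw [pv_foldl_split]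
    refine Prod.ext ?_ (Prod.ext ?_ ?_)
    · -- intersection
      show rest.foldl (fun a tpl => PySem.Set.inter a (PySem.Set.ofList (PySem.Dict.ofList (κ := String) (ν := String) tpl).keys)) (PySem.Set.ofList (PySem.Dict.ofList (κ := String) (ν := String) first).keys) = _
      rw [← List.foldl_map, pv_inter_fold]
      rw [PySem.Set.ofList_eq_self_of_nodup _ (PySem.Dict.nodup_keys_ofList first)]
      rw [PySem.Set.ofList_eq_self_of_nodup _ ((PySem.Dict.nodup_keys_ofList first).filter _)]
    · -- union
      show rest.foldl (fun u tpl => PySem.Set.union u (PySem.Set.ofList (PySem.Dict.ofList (κ := String) (ν := String) tpl).keys)) (PySem.Set.ofList (PySem.Dict.ofList (κ := String) (ν := String) first).keys) = _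
      rw [← List.foldl_map]
      have hmap : rest.map (fun tpl => PySem.Set.ofList (PySem.Dict.ofList (κ := String) (ν := String) tpl).keys)
          = (rest.map (fun tpl => (PySem.Dict.ofList (κ := String) (ν := String) tpl).keys)).map PySem.Set.ofList := by
        rw [List.map_map]; rfl
      rw [hmap, pv_union_fold]
      simp only [List.map_cons, List.flatten_cons]
    · -- merge
      show (rest.foldl (fun d tpl => PySem.Dict.update d (PySem.Dict.ofList tpl).items) (PySem.Dict.ofList first)).items = _
      rw [pv_merge_fold]
      simp only [List.map_cons, List.flatten_cons]
      rw [pv_ofList_append, pv_ofList_items]
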